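-- pv_equiv track=rewrite | github.com/Boot41/Meghana-fse | server/core/services/travel_service.py | _categorize_places
-- ===== SOURCE A (Python) =====
-- from typing import Dict, List, Optional, Any
--
-- def _categorize_places(places: List[Dict]) -> Dict[str, List[Dict]]:
--     """Group places by category."""
--     categories = {
--         'attractions': [],
--         'restaurants': [],
--         'shopping': [],
--         'entertainment': [],
--         'nature': [],
--         'cultural': []
--     }
--
--     for place in places:
--         category = place.get('category', '').lower()
--
--         if any(word in category for word in ['restaurant', 'cafe', 'food']):
--             categories['restaurants'].append(place)
--         elif any(word in category for word in ['shop', 'mall', 'market']):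
--             categories['shopping'].append(place)
--         elif any(word in category for word in ['park', 'garden', 'beach', 'mountain']):
--             categories['nature'].append(place)
--         elif any(word in category for word in ['museum', 'temple', 'church', 'historic']):
--             categories['cultural'].append(place)
--         elif any(word in category for word in ['cinema', 'theater', 'club', 'entertainment']):
--             categories['entertainment'].append(place)
--         else:
--             categories['attractions'].append(place)
--
--     return categories
-- ===== SOURCE B (Python) =====
-- from typing import Dict, List, Optional, Any
--
-- _RULES = [
--     ('restaurants', ['restaurant', 'cafe', 'food']),
--     ('shopping', ['shop', 'mall', 'market']),
--     ('nature', ['park', 'garden', 'beach', 'mountain']),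
--     ('cultural', ['museum', 'temple', 'church', 'historic']),
--     ('entertainment', ['cinema', 'theater', 'club', 'entertainment']),
-- ]
--
-- _BUCKETS = ['attractions', 'restaurants', 'shopping', 'entertainment', 'nature', 'cultural']
--
-- def _classify(place: Dict) -> str:
--     category = place.get('category', '').lower()
--     return next((name for name, words in _RULES
--                  if any(word in category for word in words)), 'attractions')
--
-- def _categorize_places(places: List[Dict]) -> Dict[str, List[Dict]]:
--     """Group places by category."""
--     return {name: [p for p in places if _classify(p) == name] for name in _BUCKETS}
-- ===== Notes on version B (the rewrite author's own statement) =====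
-- stated objective: idiomatic
-- what changed: Replaces the six-way if/elif chain with a single-pass mutable dict by a declarative (bucket, keywords) rules table plus a classify helper, and builds the result as a dict comprehension filtering the places per bucket instead of appending while iterating.
import Mathlib
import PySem

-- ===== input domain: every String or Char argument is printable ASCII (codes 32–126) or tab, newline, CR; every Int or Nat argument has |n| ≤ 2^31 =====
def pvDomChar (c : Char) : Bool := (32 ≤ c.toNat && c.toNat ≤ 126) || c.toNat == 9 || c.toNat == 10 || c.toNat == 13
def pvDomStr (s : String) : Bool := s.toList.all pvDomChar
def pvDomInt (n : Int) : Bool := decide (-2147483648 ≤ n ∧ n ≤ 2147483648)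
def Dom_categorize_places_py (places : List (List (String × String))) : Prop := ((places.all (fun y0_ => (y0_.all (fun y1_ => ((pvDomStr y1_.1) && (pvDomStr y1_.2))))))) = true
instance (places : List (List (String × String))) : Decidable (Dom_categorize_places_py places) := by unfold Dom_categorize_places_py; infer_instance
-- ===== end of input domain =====

-- B replaces A's if/elif chain and mutated dict by a rules table with a classify
-- helper and a per-bucket filter comprehension (idiomatic; same cost).


-- ===== PORT A =====
-- place.get('category', '') : first-match association-list lookup (Dict.mk keeps the raw list)
def pvGetCategory (place : List (String × String)) : String :=
  (PySem.Dict.mk place).getD "category" ""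

-- one iteration of A's for-loop: the if/elif chain appending to the mutated dict
-- category = place.get('category', '').lower()
def pvCat (place : List (String × String)) : String :=
  PySem.Str.lower (pvGetCategory place)

def pvStepA (d : PySem.Dict String (List (List (String × String))))
    (place : List (String × String)) : PySem.Dict String (List (List (String × String))) :=
  if ["restaurant", "cafe", "food"].any (fun w => PySem.Str.isIn w (pvCat place)) then
    d.modify "restaurants" [] (· ++ [place])
  else if ["shop", "mall", "market"].any (fun w => PySem.Str.isIn w (pvCat place)) then
    d.modify "shopping" [] (· ++ [place])
  else if ["park", "garden", "beach", "mountain"].any (fun w => PySem.Str.isIn w (pvCat place)) then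
    d.modify "nature" [] (· ++ [place])
  else if ["museum", "temple", "church", "historic"].any (fun w => PySem.Str.isIn w (pvCat place)) then
    d.modify "cultural" [] (· ++ [place])
  else if ["cinema", "theater", "club", "entertainment"].any (fun w => PySem.Str.isIn w (pvCat place)) then
    d.modify "entertainment" [] (· ++ [place])
  else
    d.modify "attractions" [] (· ++ [place])

def categorize_places_py (places : List (List (String × String))) :
    List (String × List (List (String × String))) :=
  let categories : PySem.Dict String (List (List (String × String))) :=
    PySem.Dict.ofList [("attractions", []), ("restaurants", []), ("shopping", []),
      ("entertainment", []), ("nature", []), ("cultural", [])]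
  (places.foldl pvStepA categories).items

-- ===== PORT B =====
def pvRules : List (String × List String) :=
  [("restaurants", ["restaurant", "cafe", "food"]),
   ("shopping", ["shop", "mall", "market"]),
   ("nature", ["park", "garden", "beach", "mountain"]),
   ("cultural", ["museum", "temple", "church", "historic"]),
   ("entertainment", ["cinema", "theater", "club", "entertainment"])]

def pvClassify (place : List (String × String)) : String :=
  match pvRules.find? (fun r =>
      r.2.any (fun w => PySem.Str.isIn w (PySem.Str.lower ((PySem.Dict.mk place).getD "category" "")))) with
  | some r => r.1
  | none => "attractions"

def categorize_places_py_alt (places : List (List (String × String))) :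
    List (String × List (List (String × String))) :=
  ["attractions", "restaurants", "shopping", "entertainment", "nature", "cultural"].map
    (fun name => (name, places.filter (fun p => pvClassify p == name)))

-- ===== PRECONDITION & SPEC =====
def Spec_categorize_places_py (places : List (List (String × String))) (out : List (String × List (List (String × String)))) : Prop := out = categorize_places_py_alt places
instance (places : List (List (String × String))) (out : List (String × List (List (String × String)))) : Decidable (Spec_categorize_places_py places out) := by unfold Spec_categorize_places_py; infer_instance

-- ===== CLAIM (what is proved, stated in full; the proofs are below) =====
def Claim_equal_categorize_places_py : Prop := ∀ (places : List (List (String × String))), Dom_categorize_places_py places → Spec_categorize_places_py places (categorize_places_py places)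

-- ===== LEMMAS AND PROOFS =====

-- A's chain picks exactly the bucket pvClassify names
theorem pvStepA_eq (d : PySem.Dict String (List (List (String × String))))
    (place : List (String × String)) :
    pvStepA d place = d.modify (pvClassify place) [] (· ++ [place]) := by
  unfold pvStepA pvClassify pvRules pvCat pvGetCategory
  split_ifs with h1 h2 h3 h4 h5 <;>
    simp only [Bool.not_eq_true] at * <;> simp only [List.find?, *]

theorem pvClassify_cases (place : List (String × String)) :
    pvClassify place = "restaurants" ∨ pvClassify place = "shopping" ∨
    pvClassify place = "nature" ∨ pvClassify place = "cultural" ∨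
    pvClassify place = "entertainment" ∨ pvClassify place = "attractions" := by
  unfold pvClassify
  cases hf : pvRules.find? (fun r =>
      r.2.any (fun w => PySem.Str.isIn w (PySem.Str.lower ((PySem.Dict.mk place).getD "category" "")))) with
  | none => simp
  | some r =>
    have hm := List.mem_of_find?_eq_some hf
    simp only [pvRules, List.mem_cons, List.not_mem_nil, or_false] at hm
    rcases hm with h | h | h | h | h <;> subst h <;> simp

-- loop invariant: folding A's step over ps from the six-bucket dict appends,
-- to each bucket, the places of ps that pvClassify sends to it
theorem pvLoop_items (ps : List (List (String × String)))
    (l0 l1 l2 l3 l4 l5 : List (List (String × String))) :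
    (ps.foldl pvStepA (PySem.Dict.mk [("attractions", l0), ("restaurants", l1),
        ("shopping", l2), ("entertainment", l3), ("nature", l4), ("cultural", l5)])).items =
      [("attractions", l0 ++ ps.filter (fun p => pvClassify p == "attractions")),
       ("restaurants", l1 ++ ps.filter (fun p => pvClassify p == "restaurants")),
       ("shopping", l2 ++ ps.filter (fun p => pvClassify p == "shopping")),
       ("entertainment", l3 ++ ps.filter (fun p => pvClassify p == "entertainment")),
       ("nature", l4 ++ ps.filter (fun p => pvClassify p == "nature")),
       ("cultural", l5 ++ ps.filter (fun p => pvClassify p == "cultural"))] := by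
  induction ps generalizing l0 l1 l2 l3 l4 l5 with
  | nil => simp
  | cons place ps ih =>
    rw [List.foldl_cons, pvStepA_eq]
    rcases pvClassify_cases place with h | h | h | h | h | h <;>
      (simp only [h, PySem.Dict.modify, PySem.Dict.contains, PySem.Dict.insert, PySem.Dict.get?,
          PySem.Dict.getD, List.filter_cons];
       simp [ih, List.append_assoc])

-- ===== VERDICT (by name: the statement is the Claim_ definition above) =====
theorem categorize_places_py_spec : Claim_equal_categorize_places_py := by
  intro places _
  show categorize_places_py places = categorize_places_py_alt places
  unfold categorize_places_py categorize_places_py_alt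
  simpa [PySem.Dict.ofList] using pvLoop_items places [] [] [] [] [] []
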